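-- pv_equiv track=rewrite | github.com/Husky-in-Wolves/Complex-Topic-Pattern-Mining | _3A_CTP_SEQMining_Algo.py | findTopic
-- ===== SOURCE A (Python) =====
-- def findTopic(LDA_list,S,alpha):
--     E = {}
--     prov_topic = [] if len(alpha)==0 else alpha
--     for i in S.keys():
--         time_list=S[i]
--         lda_list=set([int(topic) for time_ in time_list for topic in LDA_list[time_] if int(topic) not in prov_topic])
--         for topic in lda_list:
--             if topic not in E.keys():
--                 E[topic]=0
--             E[topic]+=1
--     E=set([key for key in E if E[key]>=2])
--     return sorted(list(E))
-- ===== SOURCE B (Python) =====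
-- def findTopic(LDA_list, S, alpha):
--     # Sort-then-scan instead of a topic->count dict: collect the distinct
--     # (topic, sequence) incidence pairs, sort the topic column, and emit one
--     # representative of every run of length >= 2 -- the output comes out of
--     # the scan already sorted, no counting dict and no final sort over keys.
--     pairs = {(int(topic), i)
--              for i in S
--              for time_ in S[i]
--              for topic in LDA_list[time_]
--              if int(topic) not in alpha}
--     topics = sorted(t for t, _ in pairs)
--     out = []
--     run = 0
--     prev = None
--     for t in topics:
--         if run and t == prev:
--             run += 1
--             if run == 2:
--                 out.append(t)
--         else:
--             prev, run = t, 1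
--     return out
-- ===== Notes on version B (the rewrite author's own statement) =====
-- stated objective: alternative
-- what changed: A keeps a per-sequence dedup set and a topic-to-count dict; B instead flattens everything into one set of (topic, sequence-id) incidence pairs, sorts the topic column, and reads the answer off runs of length >= 2 in a single linear scan, so no counting dict and no final sort over dict keys exists.
import Mathlib
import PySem

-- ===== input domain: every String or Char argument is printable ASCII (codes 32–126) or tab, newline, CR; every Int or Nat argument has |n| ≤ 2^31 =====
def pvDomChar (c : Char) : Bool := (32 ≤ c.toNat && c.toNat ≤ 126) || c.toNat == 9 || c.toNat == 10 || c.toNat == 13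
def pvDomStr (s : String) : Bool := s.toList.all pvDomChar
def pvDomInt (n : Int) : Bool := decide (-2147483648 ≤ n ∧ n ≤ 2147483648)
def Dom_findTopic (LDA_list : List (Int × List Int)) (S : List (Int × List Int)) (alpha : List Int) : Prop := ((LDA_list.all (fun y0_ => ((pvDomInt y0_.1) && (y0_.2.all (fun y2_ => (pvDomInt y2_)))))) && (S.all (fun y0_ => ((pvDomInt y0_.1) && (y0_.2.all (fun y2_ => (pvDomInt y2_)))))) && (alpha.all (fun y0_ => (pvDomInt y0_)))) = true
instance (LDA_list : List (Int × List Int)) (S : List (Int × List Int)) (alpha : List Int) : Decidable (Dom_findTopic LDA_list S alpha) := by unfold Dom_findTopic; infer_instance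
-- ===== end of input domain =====

-- B replaces A's per-sequence dedup set + topic→count dict by a flat set of (topic, sequence-id)
-- incidence pairs and a sort-then-run-length scan over the topic column (alternative algorithm, same cost).

-- ===== PORT A =====
def findTopic (LDA_list : List (Int × List Int)) (S : List (Int × List Int)) (alpha : List Int) : List Int :=
  let SD : PySem.Dict Int (List Int) := PySem.Dict.ofList S
  let LD : PySem.Dict Int (List Int) := PySem.Dict.ofList LDA_list
  let prov_topic : List Int := if alpha.length == 0 then [] else alpha
  let E : PySem.Dict Int Int := SD.keys.foldl (fun E i =>
    let time_list := SD.getD i []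
    let lda_list : PySem.Set Int :=
      PySem.Set.ofList (time_list.flatMap (fun time_ =>
        (LD.getD time_ []).filter (fun topic => !(prov_topic.contains topic))))
    -- for topic in lda_list: if topic not in E: E[topic] = 0; E[topic] += 1
    -- (E is only looked up / key-collected afterwards, so set-iteration order does not affect the result)
    lda_list.foldl (fun E topic =>
      let E1 := if E.contains topic then E else E.insert topic 0
      E1.insert topic (E1.getD topic 0 + 1)) E) PySem.Dict.empty
  let Efin : PySem.Set Int := PySem.Set.ofList (E.keys.filter (fun key => decide (E.getD key 0 ≥ 2)))
  PySem.List.sorted Efin (fun x => x) false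

-- ===== PORT B =====
-- one step of Source B's run-length scan; state = (out, run, prev)
def scanStep (st : List Int × Nat × Option Int) (t : Int) : List Int × Nat × Option Int :=
  if st.2.1 ≠ 0 ∧ st.2.2 = some t then
    (if st.2.1 + 1 == 2 then st.1 ++ [t] else st.1, st.2.1 + 1, st.2.2)
  else (st.1, 1, some t)

def findTopic_alt (LDA_list : List (Int × List Int)) (S : List (Int × List Int)) (alpha : List Int) : List Int :=
  let SD : PySem.Dict Int (List Int) := PySem.Dict.ofList S
  let LD : PySem.Dict Int (List Int) := PySem.Dict.ofList LDA_list
  -- pairs = {(int(topic), i) for i in S for time_ in S[i] for topic in LDA_list[time_] if int(topic) not in alpha}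
  let pairs : PySem.Set (Int × Int) :=
    PySem.Set.ofList (SD.keys.flatMap (fun i =>
      (SD.getD i []).flatMap (fun time_ =>
        ((LD.getD time_ []).filter (fun topic => !(alpha.contains topic))).map (fun t => (t, i)))))
  -- topics = sorted(t for t, _ in pairs)  (sorted over a set of ints: order of the set is irrelevant)
  let topics : List Int := PySem.List.sorted (pairs.map Prod.fst) (fun x => x) false
  (topics.foldl scanStep ([], 0, none)).1

-- ===== PRECONDITION & SPEC =====
-- Pre_ excludes exactly the inputs on which A raises KeyError: some time index in a live value of S is not a key of LDA_list.
def Pre_findTopic (LDA_list : List (Int × List Int)) (S : List (Int × List Int)) (alpha : List Int) : Prop :=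
  ∀ tl ∈ (PySem.Dict.ofList S).values, ∀ t ∈ tl, (PySem.Dict.ofList LDA_list).contains t = true
instance (LDA_list : List (Int × List Int)) (S : List (Int × List Int)) (alpha : List Int) : Decidable (Pre_findTopic LDA_list S alpha) := by unfold Pre_findTopic; infer_instance
def pvWitness_findTopic : (List (Int × List Int)) × (List (Int × List Int)) × List Int :=
  ([(0, [1, 2]), (1, [2, 3])], [(0, [0]), (1, [0, 1]), (2, [1])], [3])
def Spec_findTopic (LDA_list : List (Int × List Int)) (S : List (Int × List Int)) (alpha : List Int) (out : List Int) : Prop := out = findTopic_alt LDA_list S alpha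
instance (LDA_list : List (Int × List Int)) (S : List (Int × List Int)) (alpha : List Int) (out : List Int) : Decidable (Spec_findTopic LDA_list S alpha out) := by unfold Spec_findTopic; infer_instance

-- ===== CLAIM (what is proved, stated in full; the proofs are below) =====
def Claim_equal_findTopic : Prop := ∀ (LDA_list : List (Int × List Int)) (S : List (Int × List Int)) (alpha : List Int), Dom_findTopic LDA_list S alpha → Pre_findTopic LDA_list S alpha → Spec_findTopic LDA_list S alpha (findTopic LDA_list S alpha)

-- ===== LEMMAS AND PROOFS =====

-- the (filtered, flattened) topic occurrences of one sequence value
def topicsOf (LD : PySem.Dict Int (List Int)) (prov : List Int) (tl : List Int) : List Int :=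
  tl.flatMap (fun time_ => (LD.getD time_ []).filter (fun topic => !(prov.contains topic)))

lemma prov_collapse (alpha : List Int) :
    (if alpha.length == 0 then ([] : List Int) else alpha) = alpha := by
  cases alpha <;> simp

-- A's loop body is the counting insert
lemma stepA_eq (E : PySem.Dict Int Int) (t : Int) :
    (if E.contains t then E else E.insert t 0).insert t
        ((if E.contains t then E else E.insert t 0).getD t 0 + 1)
      = E.insert t (E.getD t 0 + 1) := by
  by_cases h : E.contains t = true
  · simp [h]
  · have h' : E.contains t = false := by simpa using h
    have hz : E.getD t 0 = 0 := PySem.Dict.getD_of_not_contains E 0 h'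
    simp [h', PySem.Dict.insert_insert_self, PySem.Dict.getD_insert_self, hz]

-- count of an element in a PySem.Set
lemma count_ofList (xs : List Int) (t : Int) :
    (PySem.Set.ofList xs).count t = if t ∈ xs then 1 else 0 := by
  by_cases h : t ∈ xs
  · rw [if_pos h]
    exact List.count_eq_one_of_mem (PySem.Set.nodup_ofList xs) ((PySem.Set.mem_ofList xs t).2 h)
  · rw [if_neg h]
    exact List.count_eq_zero.2 fun hm => h ((PySem.Set.mem_ofList xs t).1 hm)

-- A's whole fold: the count of t is the number of processed sequences containing t
lemma foldA_getD {ι : Type} (g : ι → List Int) (ks : List ι) (E : PySem.Dict Int Int) (t : Int) :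
    (ks.foldl (fun E i =>
        (PySem.Set.ofList (g i)).foldl (fun E x => E.insert x (E.getD x 0 + 1)) E) E).getD t 0
      = E.getD t 0 + ((ks.filter (fun i => decide (t ∈ g i))).length : Int) := by
  induction ks generalizing E with
  | nil => simp
  | cons k ks ih =>
      simp only [List.foldl_cons, ih, PySem.Dict.getD_foldl_insert_add_one, count_ofList,
        List.filter_cons]
      by_cases h : t ∈ g k <;> simp [h] <;> push_cast <;> ring

lemma foldA_keys {ι : Type} (g : ι → List Int) (ks : List ι) (E : PySem.Dict Int Int) :
    (ks.foldl (fun E i =>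
        (PySem.Set.ofList (g i)).foldl (fun E x => E.insert x (E.getD x 0 + 1)) E) E).keys
      = ks.foldl (fun s i => PySem.Set.update s (g i)) E.keys := by
  induction ks generalizing E with
  | nil => rfl
  | cons k ks ih =>
      simp only [List.foldl_cons, ih, PySem.Dict.keys_foldl_insert]
      congr 1
      rw [PySem.Set.update_eq_append_filter, PySem.Set.update_eq_append_filter,
        PySem.Set.ofList_ofList]

lemma nodup_canonKeys {ι : Type} (f : ι → List Int) (L : List ι)
    (s : List Int) (hs : s.Nodup) :
    (L.foldl (fun s iv => PySem.Set.update s (f iv)) s).Nodup := by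
  induction L generalizing s with
  | nil => exact hs
  | cons iv L ih => exact ih _ (PySem.Set.nodup_update s (f iv) hs)

lemma mem_canonKeys {ι : Type} (f : ι → List Int) (L : List ι) (s : List Int) (t : Int) :
    t ∈ L.foldl (fun s iv => PySem.Set.update s (f iv)) s ↔ t ∈ s ∨ ∃ iv ∈ L, t ∈ f iv := by
  induction L generalizing s with
  | nil => simp
  | cons iv L ih =>
      simp only [List.foldl_cons, ih, PySem.Set.mem_update, List.mem_cons]
      aesop

-- canonical forms shared by both sides
def tfF (LDA_list : List (Int × List Int)) (alpha : List Int) (tl : List Int) : List Int :=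
  topicsOf (PySem.Dict.ofList LDA_list) alpha tl

def canonK (LDA_list : List (Int × List Int)) (S : List (Int × List Int)) (alpha : List Int) : List Int :=
  (PySem.Dict.ofList S).items.foldl (fun s iv => PySem.Set.update s (tfF LDA_list alpha iv.2)) []

def cnt (LDA_list : List (Int × List Int)) (S : List (Int × List Int)) (alpha : List Int) (t : Int) : List (Int × List Int) :=
  (PySem.Dict.ofList S).items.filter (fun iv => decide (t ∈ tfF LDA_list alpha iv.2))

def canonOut (LDA_list : List (Int × List Int)) (S : List (Int × List Int)) (alpha : List Int) : List Int :=
  PySem.List.sorted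
    ((canonK LDA_list S alpha).filter
      (fun t => decide (((cnt LDA_list S alpha t).length : Int) ≥ 2)))
    (fun x => x) false

lemma keys_ofList_eq_map (S : List (Int × List Int)) :
    (PySem.Dict.ofList S).keys = (PySem.Dict.ofList S).items.map Prod.fst := rfl

lemma nodup_items_map_fst (S : List (Int × List Int)) :
    ((PySem.Dict.ofList S).items.map Prod.fst).Nodup := by
  rw [← keys_ofList_eq_map]
  exact PySem.Dict.nodup_keys_ofList S

lemma nodup_canonK (LDA_list : List (Int × List Int)) (S : List (Int × List Int)) (alpha : List Int) :
    (canonK LDA_list S alpha).Nodup :=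
  nodup_canonKeys _ _ _ List.nodup_nil

lemma A_eval (LDA_list : List (Int × List Int)) (S : List (Int × List Int)) (alpha : List Int) :
    findTopic LDA_list S alpha = canonOut LDA_list S alpha := by
  unfold findTopic
  simp only [prov_collapse]
  have hstep : (fun (E : PySem.Dict Int Int) (topic : Int) =>
      (if E.contains topic then E else E.insert topic 0).insert topic
        ((if E.contains topic then E else E.insert topic 0).getD topic 0 + 1))
      = fun E topic => E.insert topic (E.getD topic 0 + 1) :=
    funext fun E => funext fun t => stepA_eq E t
  rw [hstep, keys_ofList_eq_map, List.foldl_map,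
    PySem.List.foldl_congr_mem _ _ (fun E iv =>
      (PySem.Set.ofList (tfF LDA_list alpha iv.2)).foldl
        (fun E x => E.insert x (E.getD x 0 + 1)) E) _
      (by
        intro acc iv hm
        have hget : (PySem.Dict.ofList S).getD iv.1 [] = iv.2 :=
          PySem.Dict.getD_of_mem_items _ (by simpa using hm)
            (PySem.Dict.nodup_keys_ofList S) []
        simp only [hget]
        rfl)]
  rw [List.filter_congr (q := fun t => decide (((cnt LDA_list S alpha t).length : Int) ≥ 2))
    (by
      intro t _
      rw [foldA_getD]
      simp [cnt, PySem.Dict.getD_empty])]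
  rw [foldA_keys]
  have hk : (PySem.Dict.empty : PySem.Dict Int Int).keys = [] := rfl
  rw [hk]
  have hK : ((PySem.Dict.ofList S).items.foldl
      (fun s iv => PySem.Set.update s (tfF LDA_list alpha iv.2)) [])
      = canonK LDA_list S alpha := rfl
  rw [hK, PySem.Set.ofList_eq_self_of_nodup _ ((nodup_canonK LDA_list S alpha).filter _)]
  rfl

-- ---------- B side ----------

-- out-accumulator parametricity of the scan
lemma scan_out_append (L : List Int) : ∀ (out : List Int) (r : Nat) (p : Option Int),
    (L.foldl scanStep (out, r, p)).1 = out ++ (L.foldl scanStep ([], r, p)).1 := by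
  induction L with
  | nil => intro out r p; simp
  | cons t L ih =>
      intro out r p
      simp only [List.foldl_cons, scanStep]
      by_cases h : r ≠ 0 ∧ p = some t
      · rw [if_pos h, if_pos h]
        by_cases h2 : ((r + 1 : Nat) == 2) = true
        · rw [if_pos h2, if_pos h2, ih (out ++ [t]), ih ([] ++ [t])]
          simp
        · rw [if_neg h2, if_neg h2, ih out]
      · rw [if_neg h, if_neg h, ih out]

-- the scan over a run of equal elements
lemma scan_replicate (t : Int) : ∀ (m : Nat) (out : List Int) (r : Nat), 1 ≤ r →
    (List.replicate m t).foldl scanStep (out, r, some t)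
      = (out ++ (if r < 2 ∧ 2 ≤ r + m then [t] else []), r + m, some t) := by
  intro m
  induction m with
  | zero =>
      intro out r hr
      simp only [List.replicate_zero, List.foldl_nil, Nat.add_zero]
      rw [if_neg (by omega), List.append_nil]
  | succ m ih =>
      intro out r hr
      rw [List.replicate_succ, List.foldl_cons]
      have hstep : scanStep (out, r, some t) t
          = ((if ((r + 1 : Nat) == 2) then out ++ [t] else out), r + 1, some t) := by
        have hr0 : r ≠ 0 := by omega
        simp [scanStep, hr0]
      rw [hstep, ih _ (r + 1) (by omega)]
      have harith : r + 1 + m = r + (m + 1) := by omega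
      rw [harith]
      by_cases hr1 : r = 1
      · subst hr1
        have hb : ((1 + 1 : Nat) == 2) = true := rfl
        rw [hb, if_pos rfl, if_neg (by omega), if_pos (by omega), List.append_nil]
      · have hb : ((r + 1 : Nat) == 2) = false := beq_eq_false_iff_ne.2 (show r + 1 ≠ 2 by omega)
        rw [hb, if_neg (by simp), if_neg (by omega), if_neg (by omega)]

-- Source B's scan loop computes runScan
def runScan : List Int → List Int
  | [] => []
  | t :: rest =>
      (if 2 ≤ (rest.takeWhile (· == t)).length + 1 then [t] else []) ++
        runScan (rest.dropWhile (· == t))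
termination_by L => L.length
decreasing_by
  simp only [List.length_cons]
  exact Nat.lt_succ_of_le (List.length_dropWhile_le _ _)

theorem scan_eq_runScan : ∀ L : List Int, (L.foldl scanStep ([], 0, none)).1 = runScan L
  | [] => by rw [runScan.eq_def]; rfl
  | t :: rest => by
      have hsplit : rest = rest.takeWhile (· == t) ++ rest.dropWhile (· == t) :=
        (List.takeWhile_append_dropWhile).symm
      have hrep : rest.takeWhile (· == t) =
          List.replicate (rest.takeWhile (· == t)).length t := by
        apply List.eq_replicate_of_mem
        intro x hx
        have := List.mem_takeWhile_imp hx
        simpa using this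
      set m := (rest.takeWhile (· == t)).length with hm
      have hfirst : ∀ x : Int, scanStep ([], 0, none) x = ([], 1, some x) := by
        intro x; simp [scanStep]
      calc ((t :: rest).foldl scanStep ([], 0, none)).1
          = (rest.foldl scanStep ([], 1, some t)).1 := by
            simp only [List.foldl_cons, hfirst t]
        _ = (((rest.takeWhile (· == t)) ++ rest.dropWhile (· == t)).foldl scanStep
              ([], 1, some t)).1 := by rw [← hsplit]
        _ = ((rest.dropWhile (· == t)).foldl scanStep
              (([] : List Int) ++ (if 1 < 2 ∧ 2 ≤ 1 + m then [t] else []), 1 + m, some t)).1 := by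
            rw [List.foldl_append, hrep, scan_replicate t m [] 1 (by omega)]
        _ = (if 2 ≤ m + 1 then [t] else []) ++ runScan (rest.dropWhile (· == t)) := by
            rw [List.nil_append,
              show (if 1 < 2 ∧ 2 ≤ 1 + m then [t] else ([] : List Int))
                 = (if 2 ≤ m + 1 then [t] else []) from by
                   by_cases h : 2 ≤ m + 1
                   · rw [if_pos ⟨by omega, by omega⟩, if_pos h]
                   · rw [if_neg (by omega), if_neg h]]
            cases hd : rest.dropWhile (· == t) with
            | nil =>
                rw [runScan.eq_def]
                simp
            | cons u rest'' =>
                have hu : (u == t) = false := by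
                  have := List.head?_dropWhile_not (· == t) rest
                  rw [hd] at this
                  simpa using this
                have hut : t ≠ u := by
                  intro h; rw [h] at hu; simp at hu
                have hstep2 : scanStep ((if 2 ≤ m + 1 then [t] else []), 1 + m, some t) u
                    = ((if 2 ≤ m + 1 then [t] else []), 1, some u) := by
                  simp only [scanStep]
                  rw [if_neg (by rintro ⟨-, h⟩; exact hut (Option.some.injEq .. ▸ h))]
                rw [List.foldl_cons, hstep2, scan_out_append,
                  ← scan_eq_runScan (u :: rest''), List.foldl_cons, hfirst u]
        _ = runScan (t :: rest) := by
            conv_rhs => rw [runScan.eq_def]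
termination_by L => L.length
decreasing_by
  have h1 : (rest.dropWhile (· == t)).length ≤ rest.length := List.length_dropWhile_le _ _
  simp only [hd] at h1
  simp only [List.length_cons] at h1 ⊢
  omega

-- on a nondecreasing list, runScan is the strictly increasing list of values with count ≥ 2
theorem runScan_spec : ∀ L : List Int, L.Pairwise (· ≤ ·) →
    (runScan L).Pairwise (· < ·) ∧ ∀ t : Int, t ∈ runScan L ↔ 2 ≤ L.count t
  | [], _ => by
      rw [runScan.eq_def]
      exact ⟨List.Pairwise.nil, fun t => by simp⟩
  | t :: rest, hs => by
      have hrep : rest.takeWhile (· == t) =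
          List.replicate (rest.takeWhile (· == t)).length t := by
        apply List.eq_replicate_of_mem
        intro x hx
        have := List.mem_takeWhile_imp hx
        simpa using this
      set m := (rest.takeWhile (· == t)).length with hm
      set rest' := rest.dropWhile (· == t) with hr'
      have hsplit : rest = rest.takeWhile (· == t) ++ rest' :=
        (List.takeWhile_append_dropWhile).symm
      have hs' : rest'.Pairwise (· ≤ ·) :=
        List.Pairwise.sublist (List.dropWhile_sublist _) hs.of_cons
      have hgt : ∀ u ∈ rest', t < u := by
        cases hd : rest' with
        | nil => simp
        | cons v rest'' =>
            have hv : (v == t) = false := by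
              have := List.head?_dropWhile_not (· == t) rest
              rw [← hr', hd] at this
              simpa using this
            have htv : t ≤ v := by
              have hvr : v ∈ rest := by
                rw [hsplit, hd]; simp
              exact (List.pairwise_cons.1 hs).1 v hvr
            have htv' : t < v := lt_of_le_of_ne htv (by intro h; rw [← h] at hv; simp at hv)
            intro u hu
            rcases List.mem_cons.1 hu with rfl | hu
            · exact htv'
            · have hvu : v ≤ u := (List.pairwise_cons.1 (hd ▸ hs')).1 u hu
              exact lt_of_lt_of_le htv' hvu
      have ih := runScan_spec rest' hs'
      have hcount_t : (t :: rest).count t = m + 1 := by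
        have h1 : rest'.count t = 0 := List.count_eq_zero.2 (fun h => lt_irrefl t (hgt t h))
        rw [List.count_cons_self, hsplit, List.count_append, hrep, h1]
        simp [List.count_replicate]
      have hcount_u : ∀ u : Int, u ≠ t → (t :: rest).count u = rest'.count u := by
        intro u hu
        have htu : ¬ t = u := fun h => hu h.symm
        have hbe : (t == u) = false := by simpa using htu
        conv_lhs => rw [hsplit, hrep]
        simp [List.count_replicate, hbe, htu]
      have hrs : runScan (t :: rest)
          = (if 2 ≤ m + 1 then [t] else []) ++ runScan rest' := by
        rw [runScan.eq_def]
      constructor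
      · rw [hrs]
        rcases ih with ⟨ihp, ihm⟩
        have hmem : ∀ u ∈ runScan rest', t < u := by
          intro u hu
          have : 2 ≤ rest'.count u := (ihm u).1 hu
          have : u ∈ rest' := List.count_pos_iff.1 (by omega)
          exact hgt u this
        split_ifs with h
        · exact List.pairwise_cons.2 ⟨hmem, ihp⟩
        · simpa using ihp
      · intro u
        rw [hrs]
        by_cases hu : u = t
        · subst hu
          have hnot : u ∉ runScan rest' := by
            intro h
            have : 2 ≤ rest'.count u := (ih.2 u).1 h
            have : u ∈ rest' := List.count_pos_iff.1 (by omega)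
            exact lt_irrefl u (hgt u this)
          rw [hcount_t]
          split_ifs with h
          · simp [hnot, h]
          · simp [hnot]; omega
        · rw [hcount_u u hu, ← ih.2 u]
          split_ifs with h <;> simp [hu]
termination_by L => L.length
decreasing_by
  simp only [List.length_cons]
  exact Nat.lt_succ_of_le (List.length_dropWhile_le _ _)

-- the raw pair list B builds, rewritten over items
lemma bigL_eq (LDA_list : List (Int × List Int)) (S : List (Int × List Int)) (alpha : List Int) :
    (PySem.Dict.ofList S).keys.flatMap (fun i =>
        ((PySem.Dict.ofList S).getD i []).flatMap (fun time_ =>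
          (((PySem.Dict.ofList LDA_list).getD time_ []).filter
            (fun topic => !(alpha.contains topic))).map (fun t => (t, i))))
      = (PySem.Dict.ofList S).items.flatMap
          (fun iv => (tfF LDA_list alpha iv.2).map (fun t => (t, iv.1))) := by
  rw [keys_ofList_eq_map, List.flatMap_map]
  apply List.flatMap_congr
  intro iv hiv
  have hget : (PySem.Dict.ofList S).getD iv.1 [] = iv.2 :=
    PySem.Dict.getD_of_mem_items _ (by simpa using hiv) (PySem.Dict.nodup_keys_ofList S) []
  rw [hget]
  unfold tfF topicsOf
  rw [List.map_flatMap]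

lemma mem_canonK_iff (LDA_list : List (Int × List Int)) (S : List (Int × List Int))
    (alpha : List Int) (t : Int) :
    t ∈ canonK LDA_list S alpha
      ↔ ∃ iv ∈ (PySem.Dict.ofList S).items, t ∈ tfF LDA_list alpha iv.2 := by
  unfold canonK
  rw [mem_canonKeys]
  simp

lemma B_eval (LDA_list : List (Int × List Int)) (S : List (Int × List Int)) (alpha : List Int) :
    findTopic_alt LDA_list S alpha = canonOut LDA_list S alpha := by
  simp only [findTopic_alt]
  rw [bigL_eq]
  set bigL := (PySem.Dict.ofList S).items.flatMap
      (fun iv => (tfF LDA_list alpha iv.2).map (fun t => (t, iv.1))) with hbigL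
  set P := PySem.Set.ofList bigL with hP
  set topics := PySem.List.sorted (P.map Prod.fst) (fun x => x) false with htopics
  -- the multiset of topic occurrences: count of t in topics = number of sequences containing t
  have hcnt : ∀ t : Int, topics.count t = (cnt LDA_list S alpha t).length := by
    intro t
    rw [(PySem.List.sorted_perm (P.map Prod.fst) (fun x => x) false).count_eq,
      List.count_eq_countP, List.countP_map, List.countP_eq_length_filter]
    have hperm : (P.filter ((fun x => x == t) ∘ Prod.fst)).Perm
        ((cnt LDA_list S alpha t).map (fun iv => (t, iv.1))) := by
      apply (List.perm_ext_iff_of_nodup ?_ ?_).2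
      · intro p
        simp only [List.mem_filter, Function.comp, beq_iff_eq, hP,
          PySem.Set.mem_ofList, hbigL, List.mem_flatMap, List.mem_map, cnt,
          List.mem_filter, decide_eq_true_iff]
        constructor
        · rintro ⟨⟨iv, hiv, tt, htt, rfl⟩, h1⟩
          simp only at h1
          subst h1
          exact ⟨iv, ⟨hiv, htt⟩, rfl⟩
        · rintro ⟨iv, ⟨hiv, htt⟩, rfl⟩
          exact ⟨⟨iv, hiv, t, htt, rfl⟩, rfl⟩
      · exact ((PySem.Set.nodup_ofList bigL).filter _)
      · have h1 : ((cnt LDA_list S alpha t).map Prod.fst).Nodup :=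
          (nodup_items_map_fst S).sublist (List.filter_sublist.map Prod.fst)
        have h2 : ((cnt LDA_list S alpha t).map (fun iv => (t, iv.1)))
            = ((cnt LDA_list S alpha t).map Prod.fst).map (fun i => (t, i)) := by
          rw [List.map_map]
          rfl
        rw [h2]
        refine List.Nodup.map ?_ h1
        intro a b h
        simpa using congrArg Prod.snd h
    rw [hperm.length_eq, List.length_map]
  -- the scan over the sorted topic column
  have hsorted : topics.Pairwise (· ≤ ·) := by
    simpa using PySem.List.sorted_pairwise (P.map Prod.fst) (fun x => x)
  obtain ⟨hlt, hmem⟩ := runScan_spec topics hsorted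
  rw [scan_eq_runScan topics]
  unfold canonOut
  refine (PySem.List.sorted_eq_of_perm_of_pairwise_lt _ _ _ ?_ hlt).symm
  apply (List.perm_ext_iff_of_nodup ?_ ?_).2
  · intro t
    rw [hmem t, hcnt t, List.mem_filter]
    constructor
    · intro h
      have hne : cnt LDA_list S alpha t ≠ [] := by
        intro he; rw [he] at h; simp at h
      obtain ⟨iv, hiv⟩ := List.exists_mem_of_ne_nil _ hne
      have hiv' := List.mem_filter.1 hiv
      refine ⟨(mem_canonK_iff LDA_list S alpha t).2
        ⟨iv, hiv'.1, of_decide_eq_true hiv'.2⟩, ?_⟩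
      rw [decide_eq_true_iff]
      exact_mod_cast h
    · rintro ⟨-, h⟩
      rw [decide_eq_true_iff] at h
      exact_mod_cast h
  · exact hlt.nodup
  · exact (nodup_canonK LDA_list S alpha).filter _

-- ===== VERDICT (by name: the statement is the Claim_ definition above) =====
theorem findTopic_spec : Claim_equal_findTopic := by
  unfold Claim_equal_findTopic
  intro LDA_list S alpha _hDom _hPre
  unfold Spec_findTopic
  rw [A_eval, B_eval]
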